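-- pv_equiv track=rewrite | github.com/kushagrakulshrestha/Clone-MapUp-DA-Assessment-2024 | your_cloned_repo/Subbmission/python_section_1.py | rotate_and_multiply_matrix
-- ===== SOURCE A (Python) =====
-- from typing import Dict, List
--
-- def rotate_and_multiply_matrix(matrix: List[List[int]]) -> List[List[int]]:
--     """
--     Rotate the given matrix by 90 degrees clockwise, then multiply each element
--     by the sum of its original row and column index before rotation.
--
--     Args:
--     - matrix (List[List[int]]): 2D list representing the matrix to be transformed.
--
--     Returns:
--     - List[List[int]]: A new 2D list representing the transformed matrix.
--     """
--     n = len(matrix)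
--
--     # Step 1: Rotate the matrix by 90 degrees clockwise
--     rotated_matrix = [[0] * n for _ in range(n)]
--     for i in range(n):
--         for j in range(n):
--             rotated_matrix[j][n - 1 - i] = matrix[i][j]
--
--     # Step 2: Create a transformed matrix with the new values
--     transformed_matrix = [[0] * n for _ in range(n)]
--
--     for i in range(n):
--         for j in range(n):
--             row_sum = sum(rotated_matrix[i])
--             col_sum = sum(rotated_matrix[k][j] for k in range(n))
--             transformed_matrix[i][j] = row_sum + col_sum - rotated_matrix[i][j]
--
--     return transformed_matrix
-- ===== SOURCE B (Python) =====
-- from typing import Dict, List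
--
-- def rotate_and_multiply_matrix(matrix: List[List[int]]) -> List[List[int]]:
--     n = len(matrix)
--     # Rotate 90 degrees clockwise by direct gather: rotated[i][j] = matrix[n-1-j][i]
--     rotated = [[matrix[n - 1 - j][i] for j in range(n)] for i in range(n)]
--     # Precompute all row sums and column sums once, then fill each cell in O(1)
--     row_sums = [sum(row) for row in rotated]
--     col_sums = [sum(rotated[k][j] for k in range(n)) for j in range(n)]
--     return [[row_sums[i] + col_sums[j] - rotated[i][j] for j in range(n)]
--             for i in range(n)]
-- ===== Notes on version B (the rewrite author's own statement) =====
-- stated objective: faster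
-- what changed: B builds the rotated matrix by direct gather comprehension (rotated[i][j]=matrix[n-1-j][i]) instead of scatter assignment into a preallocated zero matrix, and precomputes all row sums and column sums once instead of recomputing both sums from scratch for every cell.
import Mathlib
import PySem

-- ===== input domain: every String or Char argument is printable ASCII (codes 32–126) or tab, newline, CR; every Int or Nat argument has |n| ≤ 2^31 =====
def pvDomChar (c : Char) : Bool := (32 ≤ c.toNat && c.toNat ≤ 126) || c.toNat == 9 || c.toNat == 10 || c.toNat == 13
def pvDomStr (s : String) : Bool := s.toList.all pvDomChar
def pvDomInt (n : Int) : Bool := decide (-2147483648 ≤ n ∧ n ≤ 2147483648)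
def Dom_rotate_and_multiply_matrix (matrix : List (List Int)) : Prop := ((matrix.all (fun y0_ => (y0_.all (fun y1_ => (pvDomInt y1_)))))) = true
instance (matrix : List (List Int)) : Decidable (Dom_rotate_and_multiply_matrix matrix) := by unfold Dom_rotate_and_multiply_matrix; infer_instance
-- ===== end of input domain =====

-- B rotates by direct gather and precomputes all row/column sums once (O(n^2)) instead of
-- recomputing both sums per cell as A does (O(n^3)); equal output on all inputs where A returns.


-- ===== PORT A =====
-- literal transliteration of A: scatter-build the rotated matrix into a zero matrix,
-- then recompute row and column sums for every cell (O(n^3)); element access via pyGetD/pySetD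
def rotate_and_multiply_matrix (matrix : List (List Int)) : List (List Int) :=
  let n : Int := matrix.length
  let rotated0 : List (List Int) :=
    (PySem.List.pyRange 0 n 1).map (fun _ => List.replicate matrix.length (0:Int))
  -- for i in range(n): for j in range(n): rotated[j][n-1-i] = matrix[i][j]
  let rotated :=
    (PySem.List.pyRange 0 n 1).foldl (fun rm i =>
      (PySem.List.pyRange 0 n 1).foldl (fun rm j =>
        PySem.List.pySetD rm j
          (PySem.List.pySetD (PySem.List.pyGetD rm j []) (n - 1 - i)
            (PySem.List.pyGetD (PySem.List.pyGetD matrix i []) j 0))) rm) rotated0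
  let transformed0 : List (List Int) :=
    (PySem.List.pyRange 0 n 1).map (fun _ => List.replicate matrix.length (0:Int))
  -- for i in range(n): for j in range(n): transformed[i][j] = row_sum + col_sum - rotated[i][j]
  (PySem.List.pyRange 0 n 1).foldl (fun tm i =>
    (PySem.List.pyRange 0 n 1).foldl (fun tm j =>
      let row_sum := (PySem.List.pyGetD rotated i []).sum
      let col_sum := ((PySem.List.pyRange 0 n 1).map (fun k =>
          PySem.List.pyGetD (PySem.List.pyGetD rotated k []) j 0)).sum
      PySem.List.pySetD tm i
        (PySem.List.pySetD (PySem.List.pyGetD tm i []) j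
          (row_sum + col_sum - PySem.List.pyGetD (PySem.List.pyGetD rotated i []) j 0))) tm) transformed0

-- ===== PORT B =====
-- transliteration of B: gather the rotation directly (rotated[i][j] = matrix[n-1-j][i]),
-- precompute all row sums and column sums once, then fill each cell from the tables
def rotate_and_multiply_matrix_alt (matrix : List (List Int)) : List (List Int) :=
  let n : Int := matrix.length
  let rotated :=
    (PySem.List.pyRange 0 n 1).map (fun i =>
      (PySem.List.pyRange 0 n 1).map (fun j =>
        PySem.List.pyGetD (PySem.List.pyGetD matrix (n - 1 - j) []) i 0))
  let row_sums := rotated.map (fun row => row.sum)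
  let col_sums := (PySem.List.pyRange 0 n 1).map (fun j =>
      ((PySem.List.pyRange 0 n 1).map (fun k =>
        PySem.List.pyGetD (PySem.List.pyGetD rotated k []) j 0)).sum)
  (PySem.List.pyRange 0 n 1).map (fun i =>
    (PySem.List.pyRange 0 n 1).map (fun j =>
      PySem.List.pyGetD row_sums i 0 + PySem.List.pyGetD col_sums j 0
        - PySem.List.pyGetD (PySem.List.pyGetD rotated i []) j 0))

-- ===== PRECONDITION & SPEC =====
-- Pre_ excludes exactly the ragged inputs on which A raises IndexError: A reads matrix[i][j]
-- for all i, j < len(matrix), so every row must have at least len(matrix) elements.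
def Pre_rotate_and_multiply_matrix (matrix : List (List Int)) : Prop :=
  ∀ row ∈ matrix, matrix.length ≤ row.length
instance (matrix : List (List Int)) : Decidable (Pre_rotate_and_multiply_matrix matrix) := by
  unfold Pre_rotate_and_multiply_matrix; infer_instance
def pvWitness_rotate_and_multiply_matrix : List (List Int) := [[1, 2], [3, 4]]
def Spec_rotate_and_multiply_matrix (matrix : List (List Int)) (out : List (List Int)) : Prop := out = rotate_and_multiply_matrix_alt matrix
instance (matrix : List (List Int)) (out : List (List Int)) : Decidable (Spec_rotate_and_multiply_matrix matrix out) := by unfold Spec_rotate_and_multiply_matrix; infer_instance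

-- ===== CLAIM (what is proved, stated in full; the proofs are below) =====
def Claim_equal_rotate_and_multiply_matrix : Prop := ∀ (matrix : List (List Int)), Dom_rotate_and_multiply_matrix matrix → Pre_rotate_and_multiply_matrix matrix → Spec_rotate_and_multiply_matrix matrix (rotate_and_multiply_matrix matrix)

-- ===== LEMMAS AND PROOFS =====

theorem pv_getD_set {A : Type} (l : List A) (i j : Nat) (a : A) (d : A) :
    (l.set i a).getD j d = if i = j ∧ i < l.length then a else l.getD j d := by
  by_cases hij : i = j
  · subst hij
    by_cases hi : i < l.length <;> simp [List.getD_eq_getElem?_getD, hi]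
  · simp [List.getD_eq_getElem?_getD, List.getElem?_set, hij]

theorem pv_foldl_set_getD {A : Type} (v : Nat -> A) (d : A) :
    ∀ (js : List Nat) (l : List A) (c : Nat),
      ((js.foldl (fun r j => r.set j (v j)) l).getD c d)
        = if c ∈ js ∧ c < l.length then v c else l.getD c d := by
  intro js
  induction js with
  | nil => intro l c; simp
  | cons j t ih =>
    intro l c
    simp only [List.foldl_cons]
    rw [ih, pv_getD_set]
    simp only [List.length_set, List.mem_cons]
    by_cases hc : c ∈ t <;> by_cases hl : c < l.length <;> by_cases hj : j = c
    · simp [hc, hl]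
    · simp [hc, hl]
    · simp [hc, hl, hj]
    · simp [hc, hl, hj]
    · subst hj; simp [hc, hl]
    · simp [hc, hl, hj]
      intro h; exact absurd h.symm hj
    · subst hj; simp [hc, hl]
    · simp [hc, hl, hj]

theorem pv_foldl_set_rows {A : Type} (g : Nat -> A -> A) (d : A) :
    ∀ (js : List Nat), js.Nodup → ∀ (l : List A) (c : Nat),
      ((js.foldl (fun acc j => acc.set j (g j (acc.getD j d))) l).getD c d)
        = if c ∈ js ∧ c < l.length then g c (l.getD c d) else l.getD c d := by
  intro js
  induction js with
  | nil => intro _ l c; simp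
  | cons j t ih =>
    intro hnd l c
    rcases List.nodup_cons.mp hnd with ⟨hjt, hnd'⟩
    simp only [List.foldl_cons]
    rw [ih hnd', pv_getD_set]
    simp only [List.length_set, List.mem_cons]
    by_cases hc : c ∈ t <;> by_cases hl : c < l.length <;> by_cases hj : j = c
    · exact absurd (hj ▸ hc) hjt
    · have : ¬ (j = c ∧ j < l.length) := fun h => absurd (h.1 ▸ hc) hjt
      simp [hc, hl, this]
    · simp [hc, hl]
      intro h1 h2; exact absurd (h1 ▸ h2) hl
    · simp [hc, hl]
      intro h1 h2; exact absurd (h1 ▸ h2) hl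
    · subst hj; simp [hc, hl]
    · simp [hc, hl, hj]
      intro h; exact absurd h.symm hj
    · subst hj; simp [hc, hl]
    · simp [hc, hl, hj]

theorem pv_foldl_same_row {A : Type} (i : Nat) (v : Nat -> A) :
    ∀ (js : List Nat) (l : List (List A)), i < l.length →
      (js.foldl (fun tm j => tm.set i ((tm.getD i []).set j (v j))) l)
        = l.set i (js.foldl (fun r j => r.set j (v j)) (l.getD i [])) := by
  intro js
  induction js with
  | nil =>
    intro l hi
    rw [List.foldl_nil, List.foldl_nil, List.getD_eq_getElem l [] hi,
        List.set_getElem_self]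
  | cons j t ih =>
    intro l hi
    simp only [List.foldl_cons]
    rw [ih _ (by simpa using hi)]
    rw [List.set_set, pv_getD_set]
    simp [hi]

theorem pv_foldl_length {A B : Type} (f : List A -> B -> List A)
    (h : ∀ (acc : List A) (b : B), (f acc b).length = acc.length) :
    ∀ (js : List B) (l : List A), (js.foldl f l).length = l.length := by
  intro js
  induction js with
  | nil => intro l; rfl
  | cons j t ih => intro l; simp only [List.foldl_cons, ih, h]

theorem pv_rot_outer {A : Type} (N : Nat) (w : Nat -> Nat -> A) (d0 : A) :
    ∀ (is : List Nat), (∀ i ∈ is, i < N) →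
    ∀ (rm : List (List A)), rm.length = N → (∀ r, r < N → (rm.getD r []).length = N) →
    ∀ (r c : Nat), r < N → c < N →
      (((is.foldl (fun rm i =>
          (List.range N).foldl (fun rm j =>
            rm.set j ((rm.getD j []).set (N - 1 - i) (w i j))) rm) rm).getD r []).getD c d0)
        = if (N - 1 - c) ∈ is then w (N - 1 - c) r else (rm.getD r []).getD c d0 := by
  intro is
  induction is with
  | nil => intro _ rm _ _ r c _ _; simp
  | cons i t ih =>
    intro hlt rm hlen hrows r c hr hc
    simp only [List.foldl_cons]
    have hi : i < N := hlt i (List.mem_cons_self ..)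
    have hrow' : ∀ r', (((List.range N).foldl (fun rm j =>
          rm.set j ((rm.getD j []).set (N - 1 - i) (w i j))) rm).getD r' [])
        = if r' ∈ List.range N ∧ r' < rm.length
            then (rm.getD r' []).set (N - 1 - i) (w i r') else rm.getD r' [] :=
      fun r' => pv_foldl_set_rows (fun j row => row.set (N - 1 - i) (w i j)) []
        (List.range N) List.nodup_range rm r'
    have hlen' : ((List.range N).foldl (fun rm j =>
          rm.set j ((rm.getD j []).set (N - 1 - i) (w i j))) rm).length = rm.length :=
      pv_foldl_length _ (fun acc b => by simp) _ rm
    rw [ih (fun x hx => hlt x (List.mem_cons_of_mem _ hx)) _ (by rw [hlen', hlen])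
        (by
          intro r' hr'
          have hm : r' ∈ List.range N ∧ r' < rm.length := ⟨List.mem_range.mpr hr', by omega⟩
          rw [hrow', if_pos hm, List.length_set]
          exact hrows r' hr')
        r c hr hc]
    by_cases hmem : (N - 1 - c) ∈ t
    · simp [hmem, List.mem_cons]
    · rw [if_neg hmem, hrow' r]
      simp only [List.mem_range, hlen]
      simp only [hr, and_self, if_true]
      rw [pv_getD_set]
      rw [hrows r hr]
      by_cases hceq : N - 1 - i = c
      · have h1 : N - 1 - c = i := by omega
        have h2 : N - 1 - i < N := by omega
        rw [if_pos ⟨hceq, h2⟩, h1, if_pos (List.mem_cons_self ..)]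
      · have h1 : N - 1 - c ≠ i := by omega
        rw [if_neg (fun h => hceq h.1), if_neg (by simp [List.mem_cons, hmem, h1])]

theorem pv_trans_outer {A : Type} (N : Nat) (v : Nat -> Nat -> A) (d0 : A) :
    ∀ (is : List Nat), is.Nodup → (∀ i ∈ is, i < N) →
    ∀ (tm : List (List A)), tm.length = N →
    ∀ (r c : Nat), r < N →
      (((is.foldl (fun tm i =>
          (List.range N).foldl (fun tm j =>
            tm.set i ((tm.getD i []).set j (v i j))) tm) tm).getD r []).getD c d0)
        = if r ∈ is
            then ((List.range N).foldl (fun row j => row.set j (v r j)) (tm.getD r [])).getD c d0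
            else ((tm.getD r []).getD c d0) := by
  intro is
  induction is with
  | nil => intro _ _ tm _ r c _; simp
  | cons i t ih =>
    intro hnd hlt tm hlen r c hr
    rcases List.nodup_cons.mp hnd with ⟨hit, hnd'⟩
    have hi : i < N := hlt i (List.mem_cons_self ..)
    simp only [List.foldl_cons]
    rw [pv_foldl_same_row i (fun j => v i j) (List.range N) tm (by omega)]
    rw [ih hnd' (fun x hx => hlt x (List.mem_cons_of_mem _ hx)) _ (by simp [hlen]) r c hr]
    rw [pv_getD_set]
    by_cases hrt : r ∈ t
    · have hne : ¬ i = r := fun h => absurd (h ▸ hrt) hit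
      simp [hrt, hne, List.mem_cons]
    · by_cases hir : i = r
      · subst hir
        simp [hrt, hlen, hi, List.mem_cons]
      · have hri : ¬ r = i := fun h => hir h.symm
        simp [hrt, hri, List.mem_cons]
        rw [if_neg (fun h => hir h.1)]

theorem pv_foldl_preserve_rowlen {A : Type} (f : List (List A) -> Nat -> List (List A))
    (h : ∀ (acc : List (List A)) (j r : Nat),
        ((f acc j).getD r []).length = ((acc.getD r []).length)) :
    ∀ (js : List Nat) (rm : List (List A)) (r : Nat),
      ((js.foldl f rm).getD r []).length = ((rm.getD r []).length) := by
  intro js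
  induction js with
  | nil => intro rm r; rfl
  | cons j t ih => intro rm r; simp only [List.foldl_cons, ih, h]

theorem pv_set_row_len {A : Type} (acc : List (List A)) (j r : Nat) (row : List A)
    (hlenrow : row.length = (acc.getD j []).length) :
    ((acc.set j row).getD r []).length = (acc.getD r []).length := by
  rw [pv_getD_set]
  split_ifs with h
  · rw [hlenrow, h.1]
  · rfl

-- the shared element formula: w i j = matrix[i][j] (total form, getD)
def pvW (matrix : List (List Int)) (i j : Nat) : Int := (matrix.getD i []).getD j 0

-- A's rotation loop re-expressed over Nat indices
def pvRotA (matrix : List (List Int)) : List (List Int) :=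
  (List.range matrix.length).foldl (fun rm i =>
    (List.range matrix.length).foldl (fun rm j =>
      rm.set j ((rm.getD j []).set (matrix.length - 1 - i) (pvW matrix i j))) rm)
    ((List.range matrix.length).map fun _ => List.replicate matrix.length 0)

-- B's rotation comprehension over Nat indices
def pvRotB (matrix : List (List Int)) : List (List Int) :=
  (List.range matrix.length).map (fun i =>
    (List.range matrix.length).map (fun j => pvW matrix (matrix.length - 1 - j) i))

-- the value both programs store at (i, j) of the output, read off a rotation r0
def pvE (r0 : List (List Int)) (N : Nat) (i j : Nat) : Int :=
  (r0.getD i []).sum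
    + ((List.range N).map (fun k => (r0.getD k []).getD j 0)).sum
    - (r0.getD i []).getD j 0

theorem pv_rotA_raw (matrix : List (List Int)) :
    (List.range matrix.length).foldl (fun rm (i : Nat) =>
      (List.range matrix.length).foldl (fun rm (j : Nat) =>
        rm.set j (PySem.List.pySetD (rm.getD j []) ((matrix.length : Int) - 1 - (i : Int))
          ((matrix.getD i []).getD j 0))) rm)
      ((List.range matrix.length).map (fun _ => List.replicate matrix.length 0))
    = pvRotA matrix := by
  unfold pvRotA pvW
  apply PySem.List.foldl_congr_mem
  intro acc i hi
  apply PySem.List.foldl_congr_mem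
  intro acc2 j hj
  have hi' := List.mem_range.mp hi
  have hc : ((matrix.length : Int) - 1 - (i : Int)) = ((matrix.length - 1 - i : Nat) : Int) := by
    omega
  rw [hc, PySem.List.pySetD_natCast]

theorem pv_portA_eq (matrix : List (List Int)) :
    rotate_and_multiply_matrix matrix
      = (List.range matrix.length).foldl (fun tm i =>
          (List.range matrix.length).foldl (fun tm j =>
            tm.set i ((tm.getD i []).set j (pvE (pvRotA matrix) matrix.length i j))) tm)
          ((List.range matrix.length).map fun _ => List.replicate matrix.length 0) := by
  unfold rotate_and_multiply_matrix pvE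
  simp only [PySem.List.pyRange_zero_natCast, List.foldl_map, List.map_map,
    Function.comp_def, PySem.List.pyGetD_natCast, PySem.List.pySetD_natCast]
  rw [pv_rotA_raw]

theorem pv_portB_eq (matrix : List (List Int)) :
    rotate_and_multiply_matrix_alt matrix
      = (List.range matrix.length).map (fun i =>
          (List.range matrix.length).map (fun j => pvE (pvRotB matrix) matrix.length i j)) := by
  unfold rotate_and_multiply_matrix_alt pvE
  simp only [PySem.List.pyRange_zero_natCast, List.map_map, Function.comp_def,
    PySem.List.pyGetD_natCast]
  have hrow : ∀ i : Nat,
      (List.range matrix.length).map (fun (j : Nat) =>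
        (PySem.List.pyGetD matrix ((matrix.length : Int) - 1 - (j : Int)) []).getD i 0)
      = (List.range matrix.length).map (fun j => pvW matrix (matrix.length - 1 - j) i) := by
    intro i
    apply List.map_congr_left
    intro j hj
    have hj' := List.mem_range.mp hj
    have hc : ((matrix.length : Int) - 1 - (j : Int)) = ((matrix.length - 1 - j : Nat) : Int) := by
      omega
    rw [hc, PySem.List.pyGetD_natCast]
    rfl
  simp only [hrow]
  unfold pvRotB
  apply List.map_congr_left
  intro i hi
  apply List.map_congr_left
  intro j hj
  have hi' := List.mem_range.mp hi
  have hj' := List.mem_range.mp hj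
  rw [PySem.List.getD_map_range _ _ _ _ hi', PySem.List.getD_map_range _ _ _ _ hj',
      PySem.List.getD_map_range _ _ _ _ hi']

theorem pv_rotA_len (matrix : List (List Int)) :
    (pvRotA matrix).length = matrix.length := by
  unfold pvRotA
  rw [pv_foldl_length _ (fun acc i =>
    pv_foldl_length _ (fun acc2 j => by simp) _ acc)]
  simp

theorem pv_rotA_rowlen (matrix : List (List Int)) (r : Nat) (hr : r < matrix.length) :
    ((pvRotA matrix).getD r []).length = matrix.length := by
  unfold pvRotA
  rw [pv_foldl_preserve_rowlen _ (fun acc i r' =>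
    pv_foldl_preserve_rowlen _ (fun acc2 j r2 =>
      pv_set_row_len _ _ _ _ (by simp)) _ acc r') _ _ r]
  rw [PySem.List.getD_map_range _ _ _ _ hr]
  simp

theorem pv_rotA_entry (matrix : List (List Int)) (r c : Nat)
    (hr : r < matrix.length) (hc : c < matrix.length) :
    ((pvRotA matrix).getD r []).getD c 0 = pvW matrix (matrix.length - 1 - c) r := by
  unfold pvRotA
  rw [pv_rot_outer matrix.length (pvW matrix) 0 (List.range matrix.length)
      (fun i hi => List.mem_range.mp hi) _ (by simp)
      (fun r' hr' => by rw [PySem.List.getD_map_range _ _ _ _ hr']; simp) r c hr hc]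
  rw [if_pos (List.mem_range.mpr (by omega))]

theorem pv_rotA_eq_rotB (matrix : List (List Int)) : pvRotA matrix = pvRotB matrix := by
  apply List.ext_getElem
  · rw [pv_rotA_len]; unfold pvRotB; simp
  · intro r h1 h2
    have hr : r < matrix.length := by
      have := h1; rwa [pv_rotA_len] at this
    have hrowD : (pvRotA matrix).getD r [] = (pvRotA matrix)[r] :=
      List.getD_eq_getElem _ [] h1
    have hBr : (pvRotB matrix)[r] = (List.range matrix.length).map
        (fun j => pvW matrix (matrix.length - 1 - j) r) := by
      unfold pvRotB; simp
    rw [hBr, ← hrowD]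
    apply List.ext_getElem
    · rw [pv_rotA_rowlen matrix r hr]; simp
    · intro c hc1 hc2
      have hc : c < matrix.length := by simpa using hc2
      rw [← List.getD_eq_getElem _ 0 hc1, pv_rotA_entry matrix r c hr hc]
      simp

theorem pv_fill_eq (N : Nat) (v : Nat -> Nat -> Int) :
    (List.range N).foldl (fun tm i =>
      (List.range N).foldl (fun tm j =>
        tm.set i ((tm.getD i []).set j (v i j))) tm)
      ((List.range N).map fun _ => List.replicate N 0)
    = (List.range N).map (fun i => (List.range N).map (fun j => v i j)) := by
  have hlen : ((List.range N).foldl (fun tm i =>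
      (List.range N).foldl (fun tm j =>
        tm.set i ((tm.getD i []).set j (v i j))) tm)
      ((List.range N).map fun _ => List.replicate N 0)).length = N := by
    rw [pv_foldl_length _ (fun acc i => pv_foldl_length _ (fun acc2 j => by simp) _ acc)]
    simp
  apply List.ext_getElem
  · rw [hlen]; simp
  · intro r h1 h2
    have hr : r < N := by rwa [hlen] at h1
    have hrowD : ((List.range N).foldl (fun tm i =>
        (List.range N).foldl (fun tm j =>
          tm.set i ((tm.getD i []).set j (v i j))) tm)
        ((List.range N).map fun _ => List.replicate N 0)).getD r []
        = ((List.range N).foldl (fun tm i =>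
        (List.range N).foldl (fun tm j =>
          tm.set i ((tm.getD i []).set j (v i j))) tm)
        ((List.range N).map fun _ => List.replicate N 0))[r] :=
      List.getD_eq_getElem _ [] h1
    have hrowlen : (((List.range N).foldl (fun tm i =>
        (List.range N).foldl (fun tm j =>
          tm.set i ((tm.getD i []).set j (v i j))) tm)
        ((List.range N).map fun _ => List.replicate N 0)).getD r []).length = N := by
      rw [pv_foldl_preserve_rowlen _ (fun acc i r' =>
        pv_foldl_preserve_rowlen _ (fun acc2 j r2 =>
          pv_set_row_len _ _ _ _ (by simp)) _ acc r') _ _ r]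
      rw [PySem.List.getD_map_range _ _ _ _ hr]
      simp
    have hRr : ((List.range N).map (fun i => (List.range N).map (fun j => v i j)))[r]
        = (List.range N).map (fun j => v r j) := by simp
    rw [hRr, ← hrowD]
    apply List.ext_getElem
    · rw [hrowlen]; simp
    · intro c hc1 hc2
      have hc : c < N := by simpa using hc2
      rw [← List.getD_eq_getElem _ 0 hc1]
      rw [pv_trans_outer N v 0 (List.range N) List.nodup_range
          (fun i hi => List.mem_range.mp hi) _ (by simp) r c hr]
      rw [if_pos (List.mem_range.mpr hr)]
      rw [PySem.List.getD_map_range _ _ _ _ hr]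
      rw [pv_foldl_set_getD]
      simp [hc, List.mem_range]

theorem pv_main (matrix : List (List Int)) :
    rotate_and_multiply_matrix matrix = rotate_and_multiply_matrix_alt matrix := by
  rw [pv_portA_eq, pv_portB_eq, pv_rotA_eq_rotB, pv_fill_eq]

-- ===== VERDICT (by name: the statement is the Claim_ definition above) =====
theorem rotate_and_multiply_matrix_spec : Claim_equal_rotate_and_multiply_matrix := by
  intro matrix _ _
  unfold Spec_rotate_and_multiply_matrix
  exact pv_main matrix
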